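-- pv_equiv track=rewrite | github.com/wawiesel/olm | testing/slig/src/inputUtils.py | interperetAlias
-- ===== SOURCE A (Python) =====
-- def interperetAlias(aliasStream):
--     # initializations
--     listAliases = [[]]
--     tempAliases = []
--     needAlias = True
--     needCompID = False
--
--     # walk through each word of the input
--     aliasWords = aliasStream.split()
--     for strings in aliasWords:
--         if needCompID & (strings != "end"):
--             if strings.find("-") != -1:
--                 tempRange = [int(strings.split("-")[0]), int(strings.split("-")[1])]
--                 for i in range(tempRange[1] - tempRange[0] + 1):
--                     tempAliases.append(str(tempRange[0] + i))
--             else: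
--                 tempAliases.append(strings)
--         if needAlias:
--             tempAliases.append(strings)
--             needAlias = False
--             needCompID = True
--         if strings == "end":
--             needAlias = True
--             needCompID = False
--             listAliases.append(tempAliases)
--             tempAliases = []
--
--     listAliases = listAliases[1 : len(listAliases)]
--
--     return listAliases
-- ===== SOURCE B (Python) =====
-- def _expand(word):
--     # "a-b" denotes the inclusive ID range a..b; anything else is a literal ID
--     if "-" in word:
--         lo, hi = word.split("-")[:2]
--         return [str(v) for v in range(int(lo), int(hi) + 1)]
--     return [word]
--
--
-- def interperetAlias(aliasStream):
--     # The stream is a series of groups, each terminated by the word "end":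
--     # an alias name followed by component IDs.  Cut the word list at each
--     # "end"; a group is its segment's name plus the expanded IDs.
--     words = aliasStream.split()
--     groups = []
--     while "end" in words:
--         cut = words.index("end")
--         seg, words = words[:cut], words[cut + 1:]
--         if seg:
--             groups.append([seg[0]] + [t for w in seg[1:] for t in _expand(w)])
--     return groups
-- ===== Notes on version B (the rewrite author's own statement) =====
-- stated objective: alternative
-- what changed: B replaces A's flag-driven single loop (needAlias/needCompID booleans plus a sentinel empty group sliced off at the end) with a cut-at-delimiter decomposition: repeatedly find the first 'end', slice off the segment before it, and emit nonempty segments as name-plus-expanded-IDs groups; Pre_ excludes only streams where int() raises ValueError on a malformed 'a-b' component.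
-- intended difference: On streams whose word list starts with 'end' or has two adjacent 'end' words (an 'end' in alias-name position), A emits a junk single-word group ['end'] while B skips the empty segment; treating 'end' purely as a group terminator is the intended behaviour. — e.g. on interperetAlias("end a end"): A returns [["end"], ["a"]], B returns [["a"]]
import Mathlib
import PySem

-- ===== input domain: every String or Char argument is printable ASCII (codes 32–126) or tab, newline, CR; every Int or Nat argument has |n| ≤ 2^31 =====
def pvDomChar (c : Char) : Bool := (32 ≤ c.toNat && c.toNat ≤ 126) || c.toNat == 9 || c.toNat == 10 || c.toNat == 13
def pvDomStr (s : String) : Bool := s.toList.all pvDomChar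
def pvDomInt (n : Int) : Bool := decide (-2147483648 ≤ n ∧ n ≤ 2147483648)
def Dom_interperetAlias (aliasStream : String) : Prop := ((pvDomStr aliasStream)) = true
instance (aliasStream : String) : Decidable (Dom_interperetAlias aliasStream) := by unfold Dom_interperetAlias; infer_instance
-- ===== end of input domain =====

-- B parses the word stream as "end"-terminated segments (cut at each "end") instead of A's
-- flag-driven single loop; B drops the junk group A emits when "end" sits in name position (D_).

-- ===== PORT A =====
-- A's inner "component" branch body: expand "a-b" ranges, else append the word.
-- The `.getD 0` after ofStr? is unreachable under Pre_ (Python raises ValueError exactly there).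
def aComp (ta : List String) (w : String) : List String :=
  if PySem.Str.find w "-" != -1 then
    let t0 := (PySem.Int.ofStr? (((PySem.Str.split? w "-").getD []).getD 0 "")).getD 0
    let t1 := (PySem.Int.ofStr? (((PySem.Str.split? w "-").getD []).getD 1 "")).getD 0
    (PySem.List.pyRange 0 (t1 - t0 + 1) 1).foldl (fun t i => t ++ [PySem.Int.toStr (t0 + i)]) ta
  else ta ++ [w]

-- one iteration of A's for-loop over (listAliases, tempAliases, needAlias, needCompID)
def aStep (st : List (List String) × List String × Bool × Bool) (w : String) :
    List (List String) × List String × Bool × Bool :=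
  let la := st.1
  let ta := if st.2.2.2 && !(w == "end") then aComp st.2.1 w else st.2.1
  let st2 := if st.2.2.1 then (ta ++ [w], false, true) else (ta, st.2.2.1, st.2.2.2)
  if w == "end" then (la ++ [st2.1], [], true, false) else (la, st2)

def interperetAlias (aliasStream : String) : List (List String) :=
  let st := (PySem.Str.split₀ aliasStream).foldl aStep ([[]], [], true, false)
  PySem.List.slice st.1 (some 1) (some (PySem.List.len st.1))

-- ===== PORT B =====
-- _expand: "a-b" denotes the inclusive range a..b, anything else is a literal ID
-- (`.getD 0` after ofStr? unreachable under Pre_, as in A's port)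
def bExpand (w : String) : List String :=
  if PySem.Str.isIn "-" w then
    let parts := PySem.List.slice ((PySem.Str.split? w "-").getD []) none (some 2)
    let lo := (PySem.Int.ofStr? (parts.getD 0 "")).getD 0
    let hi := (PySem.Int.ofStr? (parts.getD 1 "")).getD 0
    (PySem.List.pyRange lo (hi + 1) 1).map PySem.Int.toStr
  else [w]

-- B's while-loop: while "end" in words, cut the segment before the first "end",
-- emit it (name + expanded components) when nonempty, continue after the "end".
def bLoop (ws : List String) (groups : List (List String)) : List (List String) :=
  match h : PySem.List.index? ws "end" with
  | none => groups
  | some cut =>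
    let seg := PySem.List.slice ws none (some (cut : Int))
    let rest := PySem.List.slice ws (some ((cut : Int) + 1)) none
    bLoop rest
      (match seg with
       | [] => groups
       | s0 :: stl => groups ++ [s0 :: stl.flatMap bExpand])
termination_by ws.length
decreasing_by
  have hmem : "end" ∈ ws := (PySem.List.index?_isSome_iff ws "end").mp (by rw [h]; rfl)
  have hlen : 0 < ws.length := List.length_pos_of_mem hmem
  have hr : PySem.List.slice ws (some ((cut : Int) + 1)) none = ws.drop (cut + 1) := by
    rw [show ((cut : Int) + 1) = ((cut + 1 : Nat) : Int) by push_cast; ring,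
      PySem.List.slice_from_natCast]
  simp only [hr, List.length_drop]
  omega

def interperetAlias_alt (aliasStream : String) : List (List String) :=
  bLoop (PySem.Str.split₀ aliasStream) []

-- ===== PRECONDITION & SPEC =====
-- a word in component position containing "-" must have its first two "-"-fields int-parseable
def pvDashOk (w : String) : Bool :=
  !(PySem.Str.isIn "-" w) ||
    ((PySem.Int.ofStr? (((PySem.Str.split? w "-").getD []).getD 0 "")).isSome &&
     (PySem.Int.ofStr? (((PySem.Str.split? w "-").getD []).getD 1 "")).isSome)

-- walks the word list tracking only WHICH positions are component positions (never any output):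
-- second argument = "currently inside a group body"
def pvCompOk : List String → Bool → Bool
  | [], _ => true
  | w :: rest, inComp =>
    if inComp then
      if w == "end" then pvCompOk rest false
      else pvDashOk w && pvCompOk rest true
    else pvCompOk rest (!(w == "end"))

-- Pre_ excludes exactly the inputs where Python A raises ValueError:
-- a component-position word containing "-" whose first two "-"-fields are not int() -parseable.
def Pre_interperetAlias (aliasStream : String) : Prop :=
  pvCompOk (PySem.Str.split₀ aliasStream) false = true
instance (aliasStream : String) : Decidable (Pre_interperetAlias aliasStream) := by
  unfold Pre_interperetAlias; infer_instance

def pvWitness_interperetAlias : String := "alias1 1-3 7 end alias2 +5-7 end"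

-- "end" occurring immediately after another "end" (adjacent pair of "end" words)
def adjEnd : List String → Bool
  | a :: b :: t => (a == "end" && b == "end") || adjEnd (b :: t)
  | _ => false

-- On streams whose word list starts with "end" or has two adjacent "end"s (i.e. "end" in name
-- position), A emits a junk single-word group ["end"] there; B skips the empty segment, which
-- is the intended reading of "end" as a pure group terminator.
def D_interperetAlias (aliasStream : String) : Prop :=
  (PySem.Str.split₀ aliasStream).head? = some "end" ∨ adjEnd (PySem.Str.split₀ aliasStream) = true
instance (aliasStream : String) : Decidable (D_interperetAlias aliasStream) := by
  unfold D_interperetAlias; infer_instance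

def Spec_interperetAlias (aliasStream : String) (out : List (List String)) : Prop :=
  ¬ D_interperetAlias aliasStream → out = interperetAlias_alt aliasStream
instance (aliasStream : String) (out : List (List String)) : Decidable (Spec_interperetAlias aliasStream out) := by
  unfold Spec_interperetAlias; infer_instance

def pvDiffWitness_interperetAlias : String := "end a end"
def pvDiffWitnessOut_interperetAlias : (List (List String)) × (List (List String)) :=
  ([["end"], ["a"]], [["a"]])

-- ===== CLAIM (what is proved, stated in full; the proofs are below) =====
def Claim_unchanged_interperetAlias : Prop := ∀ (aliasStream : String), Dom_interperetAlias aliasStream → Pre_interperetAlias aliasStream → Spec_interperetAlias aliasStream (interperetAlias aliasStream)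
def Claim_changed_interperetAlias : Prop := Dom_interperetAlias (pvDiffWitness_interperetAlias) ∧ Pre_interperetAlias (pvDiffWitness_interperetAlias) ∧ D_interperetAlias (pvDiffWitness_interperetAlias) ∧ interperetAlias (pvDiffWitness_interperetAlias) = pvDiffWitnessOut_interperetAlias.1 ∧ interperetAlias_alt (pvDiffWitness_interperetAlias) = pvDiffWitnessOut_interperetAlias.2 ∧ pvDiffWitnessOut_interperetAlias.1 ≠ pvDiffWitnessOut_interperetAlias.2
def Claim_exact_interperetAlias : Prop := ∀ (aliasStream : String), Dom_interperetAlias aliasStream → Pre_interperetAlias aliasStream → D_interperetAlias aliasStream → interperetAlias aliasStream ≠ interperetAlias_alt aliasStream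

-- ===== LEMMAS AND PROOFS =====

-- A's loop in component mode, abstracted: consume words into acc until "end"
def bConsume : List String → List String → Option (List String) × List String
  | [], _ => (none, [])
  | w :: rest, acc => if w == "end" then (some acc, rest) else bConsume rest (acc ++ bExpand w)

theorem bConsume_snd_le : ∀ (ws acc : List String), (bConsume ws acc).2.length ≤ ws.length := by
  intro ws
  induction ws with
  | nil => intro acc; simp [bConsume]
  | cons w rest ih =>
    intro acc
    simp only [bConsume]
    split
    · simp
    · exact Nat.le_trans (ih _) (Nat.le_succ _)

-- A's result as a group-at-a-time recursion (proof-side characterisation of A)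
def aGroups : List String → List (List String)
  | [] => []
  | name :: rest =>
    if name == "end" then ["end"] :: aGroups rest
    else
      match h : bConsume rest [name] with
      | (some g, rest') => g :: aGroups rest'
      | (none, _) => []
termination_by ws => ws.length
decreasing_by
  · simp
  · have := bConsume_snd_le rest [name]
    rw [h] at this
    simpa using Nat.lt_succ_of_le this

-- shifting A's 0-based range loop of appends to B's map over the shifted range
theorem pvShift (t0 t1 : Int) (ta : List String) :
    (PySem.List.pyRange 0 (t1 - t0 + 1) 1).foldl (fun t i => t ++ [PySem.Int.toStr (t0 + i)]) ta
      = ta ++ (PySem.List.pyRange t0 (t1 + 1) 1).map PySem.Int.toStr := by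
  rw [PySem.List.foldl_append_singleton_eq_map]
  congr 1
  simp only [PySem.List.pyRange_one, List.map_map]
  rw [show (t1 - t0 + 1 - 0).toNat = (t1 + 1 - t0).toNat from by omega]
  congr 1
  funext k; simp [Function.comp]

-- A's component branch appends exactly B's expansion list
theorem aComp_eq (ta : List String) (w : String) : aComp ta w = ta ++ bExpand w := by
  have hf : (PySem.Str.find w "-" != -1) = PySem.Str.isIn "-" w := by
    by_cases h : ['-'] <:+: w.toList
    · have h1 : PySem.Chars.find w.toList ['-'] ≠ -1 := (PySem.Chars.find_ne_neg_one_iff _ _).mpr h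
      have h2 : PySem.Chars.isIn ['-'] w.toList = true := (PySem.Chars.isIn_iff_infix _ _).mpr h
      simp [h1, h2]
    · have h1 : PySem.Chars.find w.toList ['-'] = -1 := (PySem.Chars.find_eq_neg_one_iff _ _).mpr h
      have h2 : PySem.Chars.isIn ['-'] w.toList = false := (PySem.Chars.isIn_eq_false_iff _ _).mpr h
      simp [h1, h2]
  have hparts : ∀ (l : List String),
      (PySem.List.slice l none (some 2)).getD 0 "" = l.getD 0 "" ∧
      (PySem.List.slice l none (some 2)).getD 1 "" = l.getD 1 "" := by
    intro l
    rw [show ((2 : Int) = ((2 : Nat) : Int)) from rfl, PySem.List.slice_to_natCast]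
    constructor <;> simp [List.getD_eq_getElem?_getD, List.getElem?_take]
  rcases hb : PySem.Str.isIn "-" w with _ | _ <;> rw [hb] at hf <;>
    simp only [aComp, bExpand, hf, hb, Bool.false_eq_true, if_false, if_true]
  rw [(hparts _).1, (hparts _).2]
  exact pvShift _ _ ta

-- the A-fold in component mode, related to bConsume
theorem foldA_comp (ws : List String) : ∀ (la : List (List String)) (ta : List String),
    (∃ g rest, bConsume ws ta = (some g, rest) ∧
        ws.foldl aStep (la, ta, false, true) = rest.foldl aStep (la ++ [g], [], true, false)) ∨
    ((bConsume ws ta).1 = none ∧ ∃ t', ws.foldl aStep (la, ta, false, true) = (la, t', false, true)) := by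
  induction ws with
  | nil => intro la ta; right; exact ⟨rfl, ta, rfl⟩
  | cons w rest ih =>
    intro la ta
    by_cases hw : w == "end"
    · left
      refine ⟨ta, rest, by simp [bConsume, hw], ?_⟩
      simp [List.foldl_cons, aStep, hw]
    · have h1 : rest.foldl aStep (la, ta ++ bExpand w, false, true) =
          (w :: rest).foldl aStep (la, ta, false, true) := by
        simp [List.foldl_cons, aStep, hw, aComp_eq]
      have h2 : bConsume (w :: rest) ta = bConsume rest (ta ++ bExpand w) := by
        simp [bConsume, hw]
      rw [h2, ← h1]
      exact ih la (ta ++ bExpand w)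

-- unfolding aGroups at a non-"end" name, by the outcome of bConsume
theorem aGroups_cons_some (name : String) (rest g rest' : List String)
    (h : (name == "end") = false) (hc : bConsume rest [name] = (some g, rest')) :
    aGroups (name :: rest) = g :: aGroups rest' := by
  rw [aGroups, h]
  simp only [Bool.false_eq_true, if_false]
  split
  · rename_i g1 r1 heq
    rw [hc] at heq
    cases heq
    rfl
  · rename_i r1 heq
    rw [hc] at heq
    cases heq

theorem aGroups_cons_none (name : String) (rest : List String)
    (h : (name == "end") = false) (hc : (bConsume rest [name]).1 = none) :
    aGroups (name :: rest) = [] := by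
  rw [aGroups, h]
  simp only [Bool.false_eq_true, if_false]
  split
  · rename_i g1 r1 heq
    rw [heq] at hc
    simp at hc
  · rfl

-- the A-fold in name mode produces exactly aGroups (appended to listAliases)
theorem foldA_name : ∀ (n : Nat) (ws : List String), ws.length ≤ n → ∀ (la : List (List String)),
    (ws.foldl aStep (la, [], true, false)).1 = la ++ aGroups ws := by
  intro n
  induction n with
  | zero =>
    intro ws hle la
    have : ws = [] := List.length_eq_zero_iff.mp (Nat.le_zero.mp hle)
    subst this; simp [aGroups]
  | succ n ih =>
    intro ws hle la
    match ws with
    | [] => simp [aGroups]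
    | name :: rest =>
      simp only [List.length_cons, Nat.succ_le_succ_iff] at hle
      by_cases hn : name == "end"
      · have hstep : aStep (la, [], true, false) name = (la ++ [["end"]], [], true, false) := by
          simp_all [aStep]
        rw [List.foldl_cons, hstep, ih rest hle]
        have : name = "end" := by simpa using hn
        simp [aGroups, this]
      · have hstep : aStep (la, [], true, false) name = (la, [name], false, true) := by
          simp [aStep, hn]
        rw [List.foldl_cons, hstep]
        rcases foldA_comp rest la [name] with ⟨g, rest', hcons, heq⟩ | ⟨hnone, t', heq⟩
        · have hlen : rest'.length ≤ rest.length := by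
            have := bConsume_snd_le rest [name]
            rw [hcons] at this; simpa using this
          rw [heq, ih rest' (Nat.le_trans hlen hle),
            aGroups_cons_some name rest g rest' (by simpa using hn) hcons]
          simp
        · rw [heq, aGroups_cons_none name rest (by simpa using hn) hnone]
          simp

-- listAliases[1:len(listAliases)] drops exactly the initial [[]] sentinel
theorem pvSliceOneLen {α : Type} (x : α) (gs : List α) :
    PySem.List.slice (x :: gs) (some 1) (some (PySem.List.len (x :: gs))) = gs := by
  rw [PySem.List.slice_toNat _ (by norm_num) (by simp [PySem.List.len_eq]; positivity)]
  simp [PySem.List.len_eq]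

-- A's port computes aGroups of the word list
theorem interperetAlias_eq_aGroups (s : String) :
    interperetAlias s = aGroups (PySem.Str.split₀ s) := by
  unfold interperetAlias
  show PySem.List.slice ((PySem.Str.split₀ s).foldl aStep ([[]], [], true, false)).1 (some 1)
      (some (PySem.List.len ((PySem.Str.split₀ s).foldl aStep ([[]], [], true, false)).1)) = _
  rw [foldA_name (PySem.Str.split₀ s).length _ le_rfl [[]]]
  exact pvSliceOneLen _ _

-- bConsume when "end" occurs at index k: closes the group with the expanded prefix
theorem bConsume_mem : ∀ (ws : List String) (k : Nat), PySem.List.index? ws "end" = some k →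
    ∀ acc, bConsume ws acc = (some (acc ++ (ws.take k).flatMap bExpand), ws.drop (k + 1)) := by
  intro ws
  induction ws with
  | nil => intro k hk; simp [PySem.List.index?] at hk
  | cons w rest ih =>
    intro k hk acc
    by_cases hw : w = "end"
    · subst hw
      rw [PySem.List.index?_cons_self] at hk
      cases hk
      simp [bConsume]
    · rw [PySem.List.index?_cons_of_ne _ (hw : w ≠ "end")] at hk
      rcases Option.map_eq_some_iff.mp hk with ⟨k', hk', rfl⟩
      rw [show bConsume (w :: rest) acc = bConsume rest (acc ++ bExpand w) from by
        simp [bConsume, hw]]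
      rw [ih k' hk' (acc ++ bExpand w)]
      simp [List.take_succ_cons, List.flatMap_cons]

theorem bConsume_none : ∀ (ws : List String), "end" ∉ ws → ∀ acc, (bConsume ws acc).1 = none := by
  intro ws
  induction ws with
  | nil => intro _ acc; simp [bConsume]
  | cons w rest ih =>
    intro hmem acc
    have hw : (w == "end") = false := by
      simp only [List.mem_cons, not_or] at hmem
      simp [Ne.symm hmem.1]
    rw [show bConsume (w :: rest) acc = bConsume rest (acc ++ bExpand w) from by
      simp [bConsume, hw]]
    exact ih (by simp_all) _

-- the segment slices of bLoop, in drop/take form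
theorem pvSliceTake (ws : List String) (k : Nat) :
    PySem.List.slice ws none (some (k : Int)) = ws.take k :=
  PySem.List.slice_to_natCast ws k

theorem pvSliceDrop (ws : List String) (k : Nat) :
    PySem.List.slice ws (some ((k : Int) + 1)) none = ws.drop (k + 1) := by
  rw [show ((k : Int) + 1) = ((k + 1 : Nat) : Int) by push_cast; ring,
    PySem.List.slice_from_natCast]

-- unfolding bLoop by the outcome of index?
theorem bLoop_none (ws : List String) (gs : List (List String))
    (h : PySem.List.index? ws "end" = none) : bLoop ws gs = gs := by
  rw [bLoop]
  split
  · rfl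
  · rename_i cut heq
    rw [h] at heq
    cases heq

theorem bLoop_some (ws : List String) (gs : List (List String)) (k : Nat)
    (h : PySem.List.index? ws "end" = some k) :
    bLoop ws gs = bLoop (ws.drop (k + 1))
      (match ws.take k with
       | [] => gs
       | s0 :: stl => gs ++ [s0 :: stl.flatMap bExpand]) := by
  rw [bLoop]
  split
  · rename_i heq
    rw [h] at heq
    cases heq
  · rename_i cut heq
    rw [h] at heq
    cases heq
    rw [pvSliceTake, pvSliceDrop]

-- take/drop around the first "end"
theorem pvSplitTake (pre suf : List String) :
    (pre ++ "end" :: suf).take pre.length = pre := by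
  induction pre with
  | nil => rfl
  | cons p ps ih => simpa using ih

theorem pvSplitDropHead (pre suf : List String) :
    (pre ++ "end" :: suf).drop pre.length = "end" :: suf := by
  induction pre with
  | nil => rfl
  | cons p ps ih => simpa using ih

theorem pvSplitDrop (pre suf : List String) :
    (pre ++ "end" :: suf).drop (pre.length + 1) = suf := by
  induction pre with
  | nil => rfl
  | cons p ps ih => simpa using ih

-- adjEnd facts
theorem adjEnd_cons (a : String) (l : List String) (hl : l ≠ []) :
    adjEnd (a :: l) = ((a == "end" && l.head hl == "end") || adjEnd l) := by
  match l with
  | b :: t => simp [adjEnd]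

theorem adjEnd_cons_false {a : String} {l : List String} (h : adjEnd (a :: l) = false) :
    adjEnd l = false := by
  match l with
  | [] => simp [adjEnd]
  | b :: t => simp [adjEnd] at h; simp [adjEnd, h.2]

theorem adjEnd_drop : ∀ (k : Nat) (l : List String), adjEnd l = false →
    adjEnd (l.drop k) = false := by
  intro k
  induction k with
  | zero => intro l h; simpa using h
  | succ m ih =>
    intro l h
    match l with
    | [] => simp [adjEnd]
    | b :: t => simpa using ih t (adjEnd_cons_false h)

theorem adjEnd_drop_after_end : ∀ (l : List String), adjEnd ("end" :: l) = false →
    l.head? ≠ some "end" ∧ adjEnd l = false := by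
  intro l h
  match l with
  | [] => simp [adjEnd]
  | b :: t =>
    simp only [adjEnd, beq_self_eq_true, Bool.true_and, Bool.or_eq_false_iff] at h
    refine ⟨by simpa using h.1, h.2⟩

-- under ¬D_, B's loop produces exactly aGroups, appended to the accumulated groups
theorem bLoop_eq_aGroups : ∀ (n : Nat) (ws : List String), ws.length ≤ n →
    ws.head? ≠ some "end" → adjEnd ws = false →
    ∀ gs, bLoop ws gs = gs ++ aGroups ws := by
  intro n
  induction n with
  | zero =>
    intro ws hle _ _ gs
    have : ws = [] := List.length_eq_zero_iff.mp (Nat.le_zero.mp hle)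
    subst this
    rw [bLoop_none _ _ ((PySem.List.index?_eq_none_iff _ _).mpr (by simp))]
    simp [aGroups]
  | succ n ih =>
    intro ws hle hhead hadj gs
    match ws with
    | [] =>
      rw [bLoop_none _ _ ((PySem.List.index?_eq_none_iff _ _).mpr (by simp))]
      simp [aGroups]
    | name :: rest =>
      have hn : (name == "end") = false := by
        simp only [List.head?_cons, ne_eq, Option.some.injEq] at hhead
        simp [hhead]
      by_cases hmem : "end" ∈ rest
      · -- a full group: cut at the first "end" of rest
        obtain ⟨k, hk⟩ := Option.isSome_iff_exists.mp
          ((PySem.List.index?_isSome_iff rest "end").mpr hmem)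
        have hkws : PySem.List.index? (name :: rest) "end" = some (k + 1) := by
          rw [PySem.List.index?_cons_of_ne _ (fun h => by simp [h] at hn : name ≠ "end"), hk]
          rfl
        have hcons := bConsume_mem rest k hk [name]
        have hle' : (rest.drop (k + 1)).length ≤ n := by
          simp only [List.length_cons, Nat.succ_le_succ_iff] at hle
          simp only [List.length_drop]
          omega
        -- ¬D_ carries to the remainder
        have hrest0 : adjEnd rest = false := adjEnd_cons_false hadj
        have hdropk : rest.drop k = "end" :: rest.drop (k + 1) := by
          obtain ⟨pre, suf, hsplit, hlen, -⟩ := (PySem.List.index?_eq_some_iff _ _ _).mp hk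
          subst hsplit hlen
          rw [pvSplitDropHead, pvSplitDrop]
        have hadjdrop : adjEnd (rest.drop k) = false := adjEnd_drop k rest hrest0
        rw [hdropk] at hadjdrop
        obtain ⟨hh', ha'⟩ := adjEnd_drop_after_end _ hadjdrop
        -- unfold one step of bLoop
        rw [bLoop_some _ _ _ hkws]
        have htake : (name :: rest).take (k + 1) = name :: rest.take k := rfl
        have hdrop : (name :: rest).drop (k + 1 + 1) = rest.drop (k + 1) := rfl
        rw [htake, hdrop]
        rw [ih _ hle' hh' ha', aGroups_cons_some name rest _ _ hn hcons]
        simp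
      · -- no "end" left: B stops, A drops the unterminated group
        have hkws : PySem.List.index? (name :: rest) "end" = none := by
          rw [PySem.List.index?_eq_none_iff]
          simp only [List.mem_cons, not_or]
          exact ⟨fun h => by simp [h] at hn, hmem⟩
        rw [bLoop_none _ _ hkws,
          aGroups_cons_none name rest hn (bConsume_none rest hmem [name])]
        simp

-- inside D_: A's output contains the junk group ["end"]
theorem adjEnd_mem : ∀ (l : List String), adjEnd l = true → "end" ∈ l := by
  intro l h
  match l with
  | a :: b :: t =>
    simp only [adjEnd, Bool.or_eq_true, Bool.and_eq_true, beq_iff_eq] at h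
    rcases h with ⟨h1, -⟩ | h2
    · simp [h1]
    · have := adjEnd_mem (b :: t) h2
      simp_all

theorem adjEnd_split : ∀ (pre suf : List String), adjEnd (pre ++ "end" :: suf) = true →
    "end" ∉ pre → suf.head? = some "end" ∨ adjEnd suf = true := by
  intro pre
  induction pre with
  | nil =>
    intro suf h _
    match suf with
    | [] => simp [adjEnd] at h
    | v :: t =>
      simp only [List.nil_append, adjEnd, beq_self_eq_true, Bool.true_and,
        Bool.or_eq_true, beq_iff_eq] at h
      rcases h with h | h
      · exact Or.inl (by simp [h])
      · exact Or.inr h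
  | cons p ps ih =>
    intro suf h hnp
    have hp : p ≠ "end" := by
      intro hc
      subst hc
      simp at hnp
    have hne : ps ++ "end" :: suf ≠ [] := by simp
    simp only [List.cons_append] at h
    rw [adjEnd_cons p _ hne] at h
    have : adjEnd (ps ++ "end" :: suf) = true := by
      rcases Bool.or_eq_true_iff.mp h with h1 | h2
      · exact absurd (by simpa using (Bool.and_eq_true_iff.mp h1).1) hp
      · exact h2
    exact ih suf this (by simp_all)

theorem mem_end_aGroups : ∀ (n : Nat) (ws : List String), ws.length ≤ n →
    (ws.head? = some "end" ∨ adjEnd ws = true) → ["end"] ∈ aGroups ws := by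
  intro n
  induction n with
  | zero =>
    intro ws hle hbad
    have : ws = [] := List.length_eq_zero_iff.mp (Nat.le_zero.mp hle)
    subst this
    rcases hbad with h | h <;> simp [adjEnd] at h
  | succ n ih =>
    intro ws hle hbad
    match ws with
    | [] => rcases hbad with h | h <;> simp [adjEnd] at h
    | name :: rest =>
      by_cases hn : name = "end"
      · subst hn
        rw [aGroups]
        simp
      · have hadj : adjEnd (name :: rest) = true := by
          rcases hbad with h | h
          · exact absurd (by simpa using h) hn
          · exact h
        have hrest : adjEnd rest = true := by
          match rest with
          | [] => simp [adjEnd] at hadj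
          | b :: t =>
            simp only [adjEnd, Bool.or_eq_true, Bool.and_eq_true, beq_iff_eq] at hadj
            rcases hadj with ⟨h1, -⟩ | h2
            · exact absurd h1 hn
            · exact h2
        have hmem : "end" ∈ rest := adjEnd_mem rest hrest
        obtain ⟨k, hk⟩ := Option.isSome_iff_exists.mp
          ((PySem.List.index?_isSome_iff rest "end").mpr hmem)
        have hcons := bConsume_mem rest k hk [name]
        obtain ⟨pre, suf, hsplit, hlen, hnotin⟩ := (PySem.List.index?_eq_some_iff _ _ _).mp hk
        have hsuf : rest.drop (k + 1) = suf := by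
          subst hsplit hlen
          exact pvSplitDrop pre suf
        have hbad' : suf.head? = some "end" ∨ adjEnd suf = true := by
          refine adjEnd_split pre suf ?_ hnotin
          rw [← hsplit]
          exact hrest
        have hle' : suf.length ≤ n := by
          simp only [List.length_cons, Nat.succ_le_succ_iff] at hle
          subst hsplit
          simp at hle
          omega
        rw [aGroups_cons_some name rest _ _ (by simp [hn]) hcons, hsuf]
        exact List.mem_cons_of_mem _ (ih suf hle' hbad')

-- every group B emits starts with a word ≠ "end" (the segment's name precedes the first "end")
theorem bLoop_head_ne : ∀ (n : Nat) (ws : List String), ws.length ≤ n →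
    ∀ (gs : List (List String)), (∀ g ∈ gs, g.head? ≠ some "end") →
    ∀ g ∈ bLoop ws gs, g.head? ≠ some "end" := by
  intro n
  induction n with
  | zero =>
    intro ws hle gs hgs
    have : ws = [] := List.length_eq_zero_iff.mp (Nat.le_zero.mp hle)
    subst this
    rw [bLoop_none _ _ ((PySem.List.index?_eq_none_iff _ _).mpr (by simp))]
    exact hgs
  | succ n ih =>
    intro ws hle gs hgs
    match hk : PySem.List.index? ws "end" with
    | none => rw [bLoop_none _ _ hk]; exact hgs
    | some k =>
      obtain ⟨pre, suf, hsplit, hlen, hnotin⟩ := (PySem.List.index?_eq_some_iff _ _ _).mp hk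
      have htake : ws.take k = pre := by
        rw [hsplit, ← hlen]
        exact pvSplitTake pre suf
      have hdrop : ws.drop (k + 1) = suf := by
        rw [hsplit, ← hlen]
        exact pvSplitDrop pre suf
      have hle' : suf.length ≤ n := by
        rw [hsplit] at hle
        simp at hle
        omega
      rw [bLoop_some _ _ _ hk, htake, hdrop]
      match hpre : pre with
      | [] => exact ih suf hle' gs hgs
      | s0 :: stl =>
        refine ih suf hle' _ ?_
        intro g hg
        rcases List.mem_append.mp hg with h | h
        · exact hgs g h
        · have : g = s0 :: stl.flatMap bExpand := by simpa using h
          subst this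
          have : s0 ≠ "end" := fun hc => hnotin (by simp [hpre, hc])
          simpa using this

-- B's port evaluated at the difference witness, one bLoop step at a time
theorem pvAltWitness : interperetAlias_alt pvDiffWitness_interperetAlias =
    pvDiffWitnessOut_interperetAlias.2 := by
  have hs : PySem.Str.split₀ pvDiffWitness_interperetAlias = ["end", "a", "end"] := by decide
  show interperetAlias_alt pvDiffWitness_interperetAlias = [["a"]]
  unfold interperetAlias_alt
  rw [hs, bLoop_some _ _ 0 (by decide)]
  show bLoop ["a", "end"] [] = [["a"]]
  rw [bLoop_some _ _ 1 (by decide)]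
  show bLoop [] [["a"]] = [["a"]]
  rw [bLoop_none _ _ (by decide)]

-- ===== VERDICT (by name: the statement is the Claim_ definition above) =====
theorem interperetAlias_spec : Claim_unchanged_interperetAlias := by
  unfold Claim_unchanged_interperetAlias
  intro s _ _
  unfold Spec_interperetAlias
  intro hD
  unfold D_interperetAlias at hD
  push_neg at hD
  unfold interperetAlias_alt
  rw [interperetAlias_eq_aGroups,
    bLoop_eq_aGroups (PySem.Str.split₀ s).length _ le_rfl hD.1 (by simpa using hD.2)]
  simp

theorem interperetAlias_changed : Claim_changed_interperetAlias := by
  unfold Claim_changed_interperetAlias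
  exact ⟨by decide, by decide, by decide, by decide, pvAltWitness, by decide⟩

theorem interperetAlias_tight : Claim_exact_interperetAlias := by
  unfold Claim_exact_interperetAlias
  intro s _ _ hD heq
  unfold D_interperetAlias at hD
  have hmem : ["end"] ∈ interperetAlias s := by
    rw [interperetAlias_eq_aGroups]
    exact mem_end_aGroups (PySem.Str.split₀ s).length _ le_rfl hD
  rw [heq] at hmem
  exact bLoop_head_ne (PySem.Str.split₀ s).length _ le_rfl [] (by simp) _ hmem rfl
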